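-- pv_equiv track=rewrite | github.com/nizam-certifyos/sales-deck | src/universal_roster_v2/web/session_store.py | _review_sections_from_message
-- ===== SOURCE A (Python) =====
-- from typing import Any, Callable, Dict, List, Optional, Sequence
--
-- def _review_sections_from_message(lower: str) -> List[str]:
--     text = str(lower or "")
--     wants_schema = "schema" in text or "profile" in text
--     wants_mappings = "mapping" in text
--     wants_transformations = "transform" in text or "transformation" in text
--     wants_validations = "validation" in text or "bq" in text
--     wants_quality = "quality" in text or "audit" in text
--     cue = any(token in text for token in ["show", "summar", "what", "current", "list", "explain", "review", "and", "+", ","])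
--
--     sections: List[str] = []
--     if wants_schema and cue:
--         sections.append("schema")
--     if wants_mappings and cue:
--         sections.append("mappings")
--     if wants_transformations and cue:
--         sections.append("transformations")
--     if wants_validations and cue:
--         sections.append("bq_validations")
--     if wants_quality and cue:
--         sections.append("quality_audit")
--     if len(sections) < 2:
--         return []
--     return sections
-- ===== SOURCE B (Python) =====
-- def _review_sections_from_message(lower):
--     # Single left-to-right scan: at each position of the text, test which keywords
--     # start there, accumulating one flag per section (plus the cue flag), instead
--     # of one substring-membership query per keyword.
--     text = str(lower or "")
--     schema = mappings = transformations = validations = quality = cue = False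
--     for i in range(len(text) + 1):
--         suf = text[i:]
--         schema = schema or suf.startswith(("schema", "profile"))
--         mappings = mappings or suf.startswith("mapping")
--         transformations = transformations or suf.startswith("transform")
--         validations = validations or suf.startswith(("validation", "bq"))
--         quality = quality or suf.startswith(("quality", "audit"))
--         cue = cue or suf.startswith(("show", "summar", "what", "current",
--                                      "list", "explain", "review", "and", "+", ","))
--     if not cue:
--         return []
--     sections = [name for name, flag in
--                 [("schema", schema), ("mappings", mappings),
--                  ("transformations", transformations),
--                  ("bq_validations", validations), ("quality_audit", quality)]
--                 if flag]
--     return sections if len(sections) >= 2 else []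
-- ===== Notes on version B (the rewrite author's own statement) =====
-- stated objective: alternative
-- what changed: Instead of one substring-membership query per keyword, B makes a single left-to-right scan over the text's positions, testing at each position which keywords start there and accumulating one boolean flag per section plus the cue flag; a keyword that has another keyword as a prefix is dropped as redundant.
import Mathlib
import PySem

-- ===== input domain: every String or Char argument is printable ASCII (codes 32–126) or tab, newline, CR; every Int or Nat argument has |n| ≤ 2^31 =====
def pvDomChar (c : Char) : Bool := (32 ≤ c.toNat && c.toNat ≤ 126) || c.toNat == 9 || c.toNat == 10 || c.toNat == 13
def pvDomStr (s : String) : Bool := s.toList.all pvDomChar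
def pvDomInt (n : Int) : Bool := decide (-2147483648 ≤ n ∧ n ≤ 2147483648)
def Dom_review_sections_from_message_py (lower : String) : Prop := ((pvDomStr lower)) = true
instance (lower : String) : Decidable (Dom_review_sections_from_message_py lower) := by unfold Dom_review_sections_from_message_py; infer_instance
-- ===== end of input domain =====

-- B replaces A's per-keyword substring-membership queries by ONE left-to-right scan over
-- the text's positions, accumulating a flag per section (objective: alternative). Return values only.

-- ===== PORT A =====
def review_sections_from_message_py (lower : String) : List String :=
  -- text = str(lower or ""): for a str argument this is lower itself ('' or '' = '')
  let text := lower
  let wants_schema := PySem.Str.isIn "schema" text || PySem.Str.isIn "profile" text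
  let wants_mappings := PySem.Str.isIn "mapping" text
  let wants_transformations := PySem.Str.isIn "transform" text || PySem.Str.isIn "transformation" text
  let wants_validations := PySem.Str.isIn "validation" text || PySem.Str.isIn "bq" text
  let wants_quality := PySem.Str.isIn "quality" text || PySem.Str.isIn "audit" text
  let cue := (["show", "summar", "what", "current", "list", "explain", "review", "and", "+", ","] : List String).any
    (fun token => PySem.Str.isIn token text)
  let sections : List String := []
  let sections := if wants_schema && cue then sections ++ ["schema"] else sections
  let sections := if wants_mappings && cue then sections ++ ["mappings"] else sections
  let sections := if wants_transformations && cue then sections ++ ["transformations"] else sections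
  let sections := if wants_validations && cue then sections ++ ["bq_validations"] else sections
  let sections := if wants_quality && cue then sections ++ ["quality_audit"] else sections
  if sections.length < 2 then [] else sections

-- ===== PORT B =====
-- B's loop 'for i in range(len(text)+1): suf = text[i:]' visits exactly the suffixes of the
-- text, i.e. text.toList.tails; 'suf.startswith(kw)' is exactly List.isPrefixOf on char lists,
-- and startswith with a tuple is the ||-chain of the members' checks.
def review_sections_from_message_py_alt (lower : String) : List String :=
  let text := lower.toList
  let r := text.tails.foldl
    (fun (acc : Bool × Bool × Bool × Bool × Bool × Bool) suf =>
      (acc.1 || ("schema".toList.isPrefixOf suf || "profile".toList.isPrefixOf suf),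
       acc.2.1 || "mapping".toList.isPrefixOf suf,
       acc.2.2.1 || "transform".toList.isPrefixOf suf,
       acc.2.2.2.1 || ("validation".toList.isPrefixOf suf || "bq".toList.isPrefixOf suf),
       acc.2.2.2.2.1 || ("quality".toList.isPrefixOf suf || "audit".toList.isPrefixOf suf),
       acc.2.2.2.2.2 ||
         ("show".toList.isPrefixOf suf || ("summar".toList.isPrefixOf suf ||
          ("what".toList.isPrefixOf suf || ("current".toList.isPrefixOf suf ||
          ("list".toList.isPrefixOf suf || ("explain".toList.isPrefixOf suf ||
          ("review".toList.isPrefixOf suf || ("and".toList.isPrefixOf suf ||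
          ("+".toList.isPrefixOf suf || ",".toList.isPrefixOf suf)))))))))))
    (false, false, false, false, false, false)
  if !r.2.2.2.2.2 then []
  else
    let sections :=
      (([("schema", r.1), ("mappings", r.2.1), ("transformations", r.2.2.1),
         ("bq_validations", r.2.2.2.1), ("quality_audit", r.2.2.2.2.1)] :
          List (String × Bool)).filter (fun p => p.2)).map Prod.fst
    if sections.length ≥ 2 then sections else []

-- ===== PRECONDITION & SPEC =====
def Spec_review_sections_from_message_py (lower : String) (out : List String) : Prop := out = review_sections_from_message_py_alt lower
instance (lower : String) (out : List String) : Decidable (Spec_review_sections_from_message_py lower out) := by unfold Spec_review_sections_from_message_py; infer_instance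

-- ===== CLAIM (what is proved, stated in full; the proofs are below) =====
def Claim_equal_review_sections_from_message_py : Prop := ∀ (lower : String), Dom_review_sections_from_message_py lower → Spec_review_sections_from_message_py lower (review_sections_from_message_py lower)

-- ===== LEMMAS AND PROOFS =====

-- the 6-flag scan fold is componentwise 'any' over the scanned list
lemma pvScan_eq (P1 P2 P3 P4 P5 P6 : List Char → Bool) (l : List (List Char))
    (s m t v q c : Bool) :
    l.foldl (fun (acc : Bool × Bool × Bool × Bool × Bool × Bool) suf =>
      (acc.1 || P1 suf, acc.2.1 || P2 suf, acc.2.2.1 || P3 suf,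
       acc.2.2.2.1 || P4 suf, acc.2.2.2.2.1 || P5 suf, acc.2.2.2.2.2 || P6 suf))
      (s, m, t, v, q, c)
    = (s || l.any P1, m || l.any P2, t || l.any P3,
       v || l.any P4, q || l.any P5, c || l.any P6) := by
  induction l generalizing s m t v q c with
  | nil => simp
  | cons x xs ih => simp [List.foldl_cons, ih, Bool.or_assoc]

-- a keyword starts at some position of l iff it is a substring of l
lemma pvAny_tails (kw l : List Char) :
    l.tails.any (fun suf => kw.isPrefixOf suf) = PySem.Chars.isIn kw l := by
  rw [Bool.eq_iff_iff]
  simp only [List.any_eq_true, List.mem_tails, List.isPrefixOf_iff_prefix,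
    PySem.Chars.isIn_iff_infix, List.infix_iff_prefix_suffix]
  constructor
  · rintro ⟨suf, hs, hp⟩; exact ⟨suf, hp, hs⟩
  · rintro ⟨suf, hp, hs⟩; exact ⟨suf, hs, hp⟩

-- "transformation" contains "transform", so A's second check is absorbed
lemma pvTransform_absorb (l : List Char) :
    (PySem.Chars.isIn "transform".toList l || PySem.Chars.isIn "transformation".toList l)
      = PySem.Chars.isIn "transform".toList l := by
  cases h : PySem.Chars.isIn "transform".toList l with
  | true => simp
  | false =>
    simp only [Bool.false_or]
    rw [PySem.Chars.isIn_eq_false_iff] at h ⊢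
    exact fun h2 => h (((by decide : "transform".toList <+: "transformation".toList).isInfix).trans h2)

-- any over an ||-chain splits componentwise (used to split B's tuple-startswith checks)
lemma pvAny_or {a : Type} (p q : a -> Bool) (l : List a) :
    l.any (fun x => p x || q x) = (l.any p || l.any q) := by
  induction l with
  | nil => simp
  | cons x xs ih => simp [List.any_cons, ih]; cases p x <;> cases q x <;> simp

-- ===== VERDICT (by name: the statement is the Claim_ definition above) =====
theorem review_sections_from_message_py_spec : Claim_equal_review_sections_from_message_py := by
  intro lower _
  unfold Spec_review_sections_from_message_py
  unfold review_sections_from_message_py review_sections_from_message_py_alt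
  simp only [pvScan_eq, Bool.false_or, pvAny_or, pvAny_tails, PySem.Str.isIn_eq,
    pvTransform_absorb, List.any_cons, List.any_nil, Bool.or_false]
  generalize (PySem.Chars.isIn "show".toList lower.toList || (PySem.Chars.isIn "summar".toList lower.toList || (PySem.Chars.isIn "what".toList lower.toList || (PySem.Chars.isIn "current".toList lower.toList || (PySem.Chars.isIn "list".toList lower.toList || (PySem.Chars.isIn "explain".toList lower.toList || (PySem.Chars.isIn "review".toList lower.toList || (PySem.Chars.isIn "and".toList lower.toList || (PySem.Chars.isIn "+".toList lower.toList || PySem.Chars.isIn ",".toList lower.toList))))))))) = c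
  generalize PySem.Chars.isIn "schema".toList lower.toList = b1
  generalize PySem.Chars.isIn "profile".toList lower.toList = b2
  generalize PySem.Chars.isIn "mapping".toList lower.toList = b3
  generalize PySem.Chars.isIn "transform".toList lower.toList = b4
  generalize PySem.Chars.isIn "validation".toList lower.toList = b5
  generalize PySem.Chars.isIn "bq".toList lower.toList = b6
  generalize PySem.Chars.isIn "quality".toList lower.toList = b7
  generalize PySem.Chars.isIn "audit".toList lower.toList = b8
  revert c b1 b2 b3 b4 b5 b6 b7 b8
  decide
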